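-- pv_equiv track=rewrite | github.com/lucien1011/kaggle-feedback-prize-2021 | dataset/TextDataset.py | construct_sent_label
-- ===== SOURCE A (Python) =====
-- def construct_sent_label(words,ents):
--     assert len(words) == len(ents)
--     sents,labels = [],[]
--     start,end = 0,1
--     prev_ent = ents[0]
--     n = len(words)
--     while end < n:
--         stop_punct = all([punct not in words[end] for punct in ['.','!','?']])
--         same_ent = (end <= n-2) and (ents[end].split('-')[-1] == ents[end+1].split('-')[-1])
--         if stop_punct and same_ent:
--             end += 1
--         else:
--             end += 1
--             sents.append(' '.join(words[start:end]))
--             labels.append(ents[start:end])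
--             start = end
--     return sents,labels
-- ===== SOURCE B (Python) =====
-- def construct_sent_label(words, ents):
--     assert len(words) == len(ents)
--     n = len(words)
--     tails = [e.split('-')[-1] for e in ents]
--     # pass 1: label every token with a sentence id = number of sentence ends strictly before it
--     seg = []
--     sid = 0
--     for j in range(n):
--         seg.append(sid)
--         if j >= 1 and (j == n - 1 or any(p in words[j] for p in '.!?') or tails[j] != tails[j + 1]):
--             sid += 1
--     # pass 2: group tokens into per-sentence buckets by id (closed sentences 0..sid-1 only)
--     buckets = {}
--     for w, e, s in zip(words, ents, seg):
--         if s < sid: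
--             bw, be = buckets.setdefault(s, ([], []))
--             bw.append(w)
--             be.append(e)
--     sents = [' '.join(buckets.get(k, ([], []))[0]) for k in range(sid)]
--     labels = [buckets.get(k, ([], []))[1] for k in range(sid)]
--     return sents, labels
-- ===== Notes on version B (the rewrite author's own statement) =====
-- stated objective: alternative
-- what changed: Instead of A's stateful boundary walk that slices out each sentence as it goes, B labels every token with a sentence id (cumulative count of sentence ends before it) and then groups tokens by id into dict buckets, groupby-style.
import Mathlib
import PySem

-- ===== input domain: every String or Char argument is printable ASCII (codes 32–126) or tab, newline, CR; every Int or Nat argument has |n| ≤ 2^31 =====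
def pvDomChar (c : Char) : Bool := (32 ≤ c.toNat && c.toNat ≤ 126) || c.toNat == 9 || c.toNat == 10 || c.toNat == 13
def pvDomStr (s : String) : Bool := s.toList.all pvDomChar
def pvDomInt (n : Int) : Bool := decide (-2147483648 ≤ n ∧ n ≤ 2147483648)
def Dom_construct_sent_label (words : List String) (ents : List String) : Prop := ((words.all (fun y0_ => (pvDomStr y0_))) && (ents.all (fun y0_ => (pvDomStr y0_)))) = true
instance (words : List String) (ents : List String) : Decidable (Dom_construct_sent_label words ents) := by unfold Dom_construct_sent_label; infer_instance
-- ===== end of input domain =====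

-- B replaces A's stateful boundary walk (slicing out each sentence in place) by a
-- label-then-group scheme: tag every token with a sentence id, then group tokens by id;
-- objective: alternative, same results on Pre_.


-- ===== PORT A =====
-- A's while-loop: state (sents, labels, start, end), advancing end and emitting in place.
def pvALoop (words ents : List String) (n : Int) (sents : List String)
    (labels : List (List String)) (start end_ : Int) : List String × List (List String) :=
  if h : end_ < n then
    let stop_punct := ([".", "!", "?"].all
      (fun punct => !(PySem.Str.isIn punct (PySem.List.pyGetD words end_ ""))))
    let same_ent := if end_ ≤ n - 2 then
        (PySem.List.pyGetD ((PySem.Str.split? (PySem.List.pyGetD ents end_ "") "-").getD []) (-1) "")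
          == (PySem.List.pyGetD ((PySem.Str.split? (PySem.List.pyGetD ents (end_ + 1) "") "-").getD []) (-1) "")
      else false
    if stop_punct && same_ent then
      pvALoop words ents n sents labels start (end_ + 1)
    else
      pvALoop words ents n
        (sents ++ [PySem.Str.join " " (PySem.List.slice words (some start) (some (end_ + 1)))])
        (labels ++ [PySem.List.slice ents (some start) (some (end_ + 1))])
        (end_ + 1) (end_ + 1)
  else (sents, labels)
termination_by (n - end_).toNat
decreasing_by all_goals omega

def construct_sent_label (words : List String) (ents : List String) : List String × List (List String) :=
  -- the assert and prev_ent = ents[0] raise exactly on the inputs Pre_ excludes; pyGetD stands for ents[0] there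
  let _prev_ent := PySem.List.pyGetD ents 0 ""
  let n : Int := words.length
  pvALoop words ents n [] [] 0 1

-- ===== PORT B =====
-- tails[j] = ents[j].split('-')[-1]
def pvTail (e : String) : String :=
  PySem.List.pyGetD ((PySem.Str.split? e "-").getD []) (-1) ""

-- Source B's break-after-j test: j >= 1 and (j == n-1 or any punct in words[j] or tails[j] != tails[j+1])
def pvFlagB (words tails : List String) (n j : Int) : Bool :=
  decide (1 ≤ j) &&
    ((j == n - 1)
      || ([".", "!", "?"].any (fun p => PySem.Str.isIn p (PySem.List.pyGetD words j "")))
      || !(PySem.List.pyGetD tails j "" == PySem.List.pyGetD tails (j + 1) ""))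

def construct_sent_label_alt (words : List String) (ents : List String) : List String × List (List String) :=
  let n : Int := words.length
  let tails := ents.map pvTail
  -- pass 1: seg[j] = sentence id of token j (number of sentence ends strictly before j)
  let segSid := (PySem.List.pyRange 0 n 1).foldl
    (fun (acc : List Int × Int) j =>
      (acc.1 ++ [acc.2], if pvFlagB words tails n j then acc.2 + 1 else acc.2))
    ([], 0)
  let seg := segSid.1
  let sid := segSid.2
  -- pass 2: group tokens into per-sentence buckets by id (closed sentences only);
  -- buckets.setdefault(s, ([],[])) + two in-place appends = modify s with default ([],[])
  let buckets := ((words.zip ents).zip seg).foldl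
    (fun (d : PySem.Dict Int (List String × List String)) p =>
      if p.2 < sid then
        d.modify p.2 ([], []) (fun cur => (cur.1 ++ [p.1.1], cur.2 ++ [p.1.2]))
      else d)
    PySem.Dict.empty
  ((PySem.List.pyRange 0 sid 1).map (fun k => PySem.Str.join " " ((buckets.getD k ([], [])).1)),
   (PySem.List.pyRange 0 sid 1).map (fun k => (buckets.getD k ([], [])).2))

-- ===== PRECONDITION & SPEC =====
-- Pre_ excludes exactly the inputs on which A raises: mismatched lengths (AssertionError)
-- and empty words (IndexError at ents[0]).
def Pre_construct_sent_label (words : List String) (ents : List String) : Prop :=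
  words.length = ents.length ∧ words ≠ []
instance (words : List String) (ents : List String) : Decidable (Pre_construct_sent_label words ents) := by
  unfold Pre_construct_sent_label; infer_instance

def pvWitness_construct_sent_label : List String × List String :=
  (["Hello", "world."], ["O", "O"])

def Spec_construct_sent_label (words : List String) (ents : List String) (out : List String × List (List String)) : Prop := out = construct_sent_label_alt words ents
instance (words : List String) (ents : List String) (out : List String × List (List String)) : Decidable (Spec_construct_sent_label words ents out) := by unfold Spec_construct_sent_label; infer_instance

-- ===== CLAIM (what is proved, stated in full; the proofs are below) =====
def Claim_equal_construct_sent_label : Prop := ∀ (words : List String) (ents : List String), Dom_construct_sent_label words ents → Pre_construct_sent_label words ents → Spec_construct_sent_label words ents (construct_sent_label words ents)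

-- ===== LEMMAS AND PROOFS =====

-- A's break-after-j predicate (negation of its continue-condition), for j in [1, n).
def pvIsBreak (words ents : List String) (n : Int) (j : Int) : Bool :=
  (PySem.Str.isIn "." (PySem.List.pyGetD words j "")
    || PySem.Str.isIn "!" (PySem.List.pyGetD words j "")
    || PySem.Str.isIn "?" (PySem.List.pyGetD words j ""))
  || (j == n - 1)
  || !(pvTail (PySem.List.pyGetD ents j "") == pvTail (PySem.List.pyGetD ents (j + 1) ""))

-- Segments emitted when cutting at the given break indices, inclusive ends.
def pvEmit (words ents : List String) : List Int → Int → List String × List (List String)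
  | [], _ => ([], [])
  | j :: bs, start =>
    let rest := pvEmit words ents bs (j + 1)
    ((PySem.Str.join " " (PySem.List.slice words (some start) (some (j + 1)))) :: rest.1,
     (PySem.List.slice ents (some start) (some (j + 1))) :: rest.2)

-- A's continue-condition is the negation of the break predicate (for end_ < n).
lemma pvCont_eq_not_break (words ents : List String) (n j : Int) (h : j < n) :
    (([".", "!", "?"].all
        (fun punct => !(PySem.Str.isIn punct (PySem.List.pyGetD words j ""))))
      && (if j ≤ n - 2 then
            (PySem.List.pyGetD ((PySem.Str.split? (PySem.List.pyGetD ents j "") "-").getD []) (-1) "")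
              == (PySem.List.pyGetD ((PySem.Str.split? (PySem.List.pyGetD ents (j + 1) "") "-").getD []) (-1) "")
          else false))
    = ! pvIsBreak words ents n j := by
  by_cases hj : j ≤ n - 2
  · have hne : (j == n - 1) = false := by simp; omega
    simp only [pvIsBreak, pvTail, hj, if_true, hne, List.all_cons, List.all_nil]
    cases PySem.Str.isIn "." (PySem.List.pyGetD words j "") <;>
      cases PySem.Str.isIn "!" (PySem.List.pyGetD words j "") <;>
        cases PySem.Str.isIn "?" (PySem.List.pyGetD words j "") <;> simp
  · have heq : (j == n - 1) = true := by simp; omega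
    simp [pvIsBreak, hj, heq]

-- A's loop equals the segments of the remaining break indices, appended to the accumulators.
lemma pvALoop_emit (words ents : List String) (n : Int) :
    ∀ (fuel : Nat) (end_ start : Int) (s : List String) (l : List (List String)),
    (n - end_).toNat ≤ fuel →
    pvALoop words ents n s l start end_ =
      (s ++ (pvEmit words ents ((PySem.List.pyRange end_ n 1).filter (pvIsBreak words ents n)) start).1,
       l ++ (pvEmit words ents ((PySem.List.pyRange end_ n 1).filter (pvIsBreak words ents n)) start).2) := by
  intro fuel
  induction fuel with
  | zero =>
    intro end_ start s l hf
    have h : ¬ end_ < n := by omega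
    rw [pvALoop]
    simp [h, PySem.List.pyRange_one_eq_nil (by omega : n ≤ end_), pvEmit]
  | succ k ih =>
    intro end_ start s l hf
    by_cases h : end_ < n
    · rw [pvALoop]
      simp only [h, dif_pos]
      rw [PySem.List.pyRange_one_cons h, List.filter_cons, pvCont_eq_not_break words ents n end_ h]
      cases hb : pvIsBreak words ents n end_
      · simp only [Bool.not_false, if_true, Bool.false_eq_true]
        exact ih (end_ + 1) start s l (by omega)
      · simp only [Bool.not_true, if_true]
        rw [ih (end_ + 1) (end_ + 1) _ _ (by omega)]
        simp [pvEmit]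
    · rw [pvALoop]
      simp [h, PySem.List.pyRange_one_eq_nil (by omega : n ≤ end_), pvEmit]



lemma pvTail_getD (ents : List String) (j : Int) (h : 0 ≤ j) :
    PySem.List.pyGetD (ents.map pvTail) j "" = pvTail (PySem.List.pyGetD ents j "") := by
  have hj : j = ((j.toNat : Nat) : Int) := by omega
  rw [hj, PySem.List.pyGetD_natCast, PySem.List.pyGetD_natCast]
  rcases h' : ents[j.toNat]? with _ | a
  · simp [List.getD, h']; decide
  · simp [List.getD, h']

lemma pvFlag_eq_break (words ents : List String) (n j : Int) (h1 : 1 ≤ j) :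
    pvFlagB words (ents.map pvTail) n j = pvIsBreak words ents n j := by
  unfold pvFlagB pvIsBreak
  rw [pvTail_getD ents j (by omega), pvTail_getD ents (j+1) (by omega)]
  simp only [h1, decide_true, Bool.true_and, List.any_cons, List.any_nil, Bool.or_false]
  cases (j == n - 1) <;>
    cases PySem.Str.isIn "." (PySem.List.pyGetD words j "") <;>
    cases PySem.Str.isIn "!" (PySem.List.pyGetD words j "") <;>
    cases PySem.Str.isIn "?" (PySem.List.pyGetD words j "") <;>
    simp

lemma breaks_eq (words ents : List String) (n : Int) (hn : 0 < n) :
    (PySem.List.pyRange 0 n 1).filter (pvFlagB words (ents.map pvTail) n)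
      = (PySem.List.pyRange 1 n 1).filter (pvIsBreak words ents n) := by
  rw [PySem.List.pyRange_one_cons hn, List.filter_cons]
  have h0 : pvFlagB words (ents.map pvTail) n 0 = false := by
    unfold pvFlagB; simp
  rw [h0]
  simp only [Bool.false_eq_true, if_false]
  exact List.filter_congr (fun j hj => by
    have := (PySem.List.mem_pyRange_one).1 hj
    exact pvFlag_eq_break words ents n j (by omega))

lemma foldl_seg (f : Int → Bool) (m : Nat) :
    (PySem.List.pyRange 0 (m : Int) 1).foldl
      (fun (acc : List Int × Int) j =>
        (acc.1 ++ [acc.2], if f j then acc.2 + 1 else acc.2)) ([], 0)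
    = ((PySem.List.pyRange 0 (m : Int) 1).map
         (fun j => ((((PySem.List.pyRange 0 j 1).filter f).length : Nat) : Int)),
       ((((PySem.List.pyRange 0 (m : Int) 1).filter f).length : Nat) : Int)) := by
  induction m with
  | zero => simp [PySem.List.pyRange_one_eq_nil]
  | succ k ih =>
    have hcast : (((k+1 : Nat)) : Int) = (k : Int) + 1 := by push_cast; ring
    rw [hcast, PySem.List.pyRange_one_succ_right (by positivity), List.foldl_append, ih]
    simp only [List.foldl_cons, List.foldl_nil, List.map_append, List.map_cons, List.map_nil,
      List.filter_append, List.length_append, List.filter_cons, List.filter_nil]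
    cases hf : f (k : Int) <;> simp [hf] <;> push_cast <;> ring

lemma filter_zip_extract {α : Type} :
    ∀ (xs : List α) (seg : List Int) (kq : Int) (a b : Nat)
      (hlen : seg.length = xs.length) (hab : a ≤ b) (hb : b ≤ xs.length)
      (hiff : ∀ (j : Nat) (h : j < xs.length), (seg[j]'(by omega) = kq ↔ (a ≤ j ∧ j < b))),
    ((xs.zip seg).filter (fun p => p.2 == kq)).map Prod.fst = (xs.drop a).take (b - a) := by
  intro xs
  induction xs with
  | nil => intro seg kq a b hlen hab hb hiff; simp
  | cons x xs ih =>
    intro seg kq a b hlen hab hb hiff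
    rcases seg with _ | ⟨s, seg⟩
    · simp at hlen
    · have h0 := hiff 0 (by simp)
      simp only [List.getElem_cons_zero] at h0
      rcases a with _ | a'
      · rcases b with _ | b'
        · have hs : (s == kq) = false := by
            simp only [beq_eq_false_iff_ne]; intro h; exact absurd (h0.1 h).2 (by omega)
          simp only [List.zip_cons_cons, List.filter_cons, hs, Bool.false_eq_true, if_false]
          rw [ih seg kq 0 0 (by simpa using hlen) (le_refl 0) (by omega)
            (fun j hj => by
              have := hiff (j+1) (by simpa using Nat.succ_lt_succ hj)
              simp only [List.getElem_cons_succ] at this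
              constructor
              · intro h; exact absurd (this.1 h).2 (by omega)
              · intro h; omega)]
          simp
        · have hs : (s == kq) = true := by
            simp only [beq_iff_eq]; by_contra h
            exact h (h0.2 ⟨Nat.zero_le _, by omega⟩)
          simp only [List.zip_cons_cons, List.filter_cons, hs, if_true, List.map_cons]
          rw [ih seg kq 0 b' (by simpa using hlen) (Nat.zero_le _) (by simpa using hb)
            (fun j hj => by
              have := hiff (j+1) (by simpa using Nat.succ_lt_succ hj)
              simp only [List.getElem_cons_succ] at this
              rw [this]; omega)]
          simp
      · have hs : (s == kq) = false := by
          simp only [beq_eq_false_iff_ne]; intro h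
          exact absurd (h0.1 h).1 (by omega)
        simp only [List.zip_cons_cons, List.filter_cons, hs, Bool.false_eq_true, if_false]
        rw [ih seg kq a' (b-1) (by simpa using hlen) (by omega) (by simp at hb ⊢; omega)
          (fun j hj => by
            have := hiff (j+1) (by simpa using Nat.succ_lt_succ hj)
            simp only [List.getElem_cons_succ] at this
            rw [this]; omega)]
        simp only [List.drop_succ_cons]
        congr 1
        omega

lemma countP_sorted_iff :
    ∀ (bs : List Int), bs.Pairwise (· < ·) → ∀ (k : Nat) (hk : k < bs.length) (j : Int),
    (bs.countP (fun b => decide (b < j)) = k ↔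
      ((match k, hk with
        | 0, _ => True
        | (k'+1), hk => bs[k']'(by omega) < j) ∧ j ≤ bs[k]'hk)) := by
  intro bs
  induction bs with
  | nil => intro _ k hk; simp at hk
  | cons b bs ih =>
    intro hp k hk j
    have hball : ∀ x ∈ bs, b < x := fun x hx => (List.pairwise_cons.1 hp).1 x hx
    have hp' : bs.Pairwise (· < ·) := (List.pairwise_cons.1 hp).2
    have hcc : (b :: bs).countP (fun b => decide (b < j))
        = bs.countP (fun b => decide (b < j)) + (if b < j then 1 else 0) := by
      rw [List.countP_cons]; by_cases hbj : b < j <;> simp [hbj]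
    rw [hcc]
    by_cases hbj : b < j
    · simp only [hbj, if_true]
      rcases k with _ | k'
      · simp only [List.getElem_cons_zero]
        constructor
        · intro h; omega
        · rintro ⟨-, h⟩; omega
      · have hk' : k' < bs.length := by simpa using hk
        have hih := ih hp' k' hk' j
        simp only [List.getElem_cons_succ]
        constructor
        · intro h
          have hc : bs.countP (fun b => decide (b < j)) = k' := by omega
          have h2 := hih.1 hc
          rcases k' with _ | k''
          · exact ⟨by simpa using hbj, h2.2⟩
          · exact ⟨h2.1, h2.2⟩
        · intro h
          have : bs.countP (fun b => decide (b < j)) = k' := by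
            apply hih.2
            rcases k' with _ | k''
            · exact ⟨trivial, h.2⟩
            · exact ⟨h.1, h.2⟩
          omega
    · have hz : bs.countP (fun b => decide (b < j)) = 0 := by
        apply List.countP_eq_zero.2
        intro x hx
        have := hball x hx
        simp only [decide_eq_true_eq]; omega
      simp only [hbj, if_false, hz]
      rcases k with _ | k'
      · simp only [List.getElem_cons_zero]
        constructor
        · intro _; exact ⟨trivial, by omega⟩
        · intro _; trivial
      · constructor
        · intro h; omega
        · rintro ⟨h1, h2⟩
          exfalso
          rcases k' with _ | k''
          · simp only [List.getElem_cons_zero] at h1; omega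
          · have hkk : k'' < bs.length := by simp only [List.length_cons] at hk; omega
            have hm : bs[k'']'hkk ∈ bs := List.getElem_mem hkk
            have := hball _ hm
            simp only [List.getElem_cons_succ] at h1
            omega

def pvChunks {α : Type} (xs : List α) : List Int → Int → List (List α)
  | [], _ => []
  | b :: bs, start =>
    (xs.drop start.toNat).take ((b + 1).toNat - start.toNat) :: pvChunks xs bs (b + 1)

lemma slice_eq_drop_take {α : Type} (xs : List α) (a b : Int) (ha : 0 ≤ a) (hb : 0 ≤ b) :
    PySem.List.slice xs (some a) (some b) = (xs.drop a.toNat).take (b.toNat - a.toNat) := by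
  have h1 : a = ((a.toNat : Nat) : Int) := by omega
  have h2 : b = ((b.toNat : Nat) : Int) := by omega
  rw [h1, h2, PySem.List.slice_natCast]
  have e1 : max a 0 = a := by omega
  have e2 : max b 0 = b := by omega
  simp only [Int.toNat_natCast, e1, e2]

lemma pvEmit_eq_chunks (words ents : List String) :
    ∀ (bs : List Int) (start : Int) (h0 : 0 ≤ start) (hlo : ∀ b ∈ bs, start ≤ b)
      (hp : bs.Pairwise (· < ·)),
    pvEmit words ents bs start
      = ((pvChunks words bs start).map (PySem.Str.join " "), pvChunks ents bs start) := by
  intro bs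
  induction bs with
  | nil => intro start _ _ _; simp [pvEmit, pvChunks]
  | cons b bs ih =>
    intro start h0 hlo hp
    have hb0 : 0 ≤ b + 1 := by have := hlo b (by simp); omega
    simp only [pvEmit, pvChunks, List.map_cons]
    rw [slice_eq_drop_take words start (b+1) h0 hb0,
        slice_eq_drop_take ents start (b+1) h0 hb0,
        ih (b+1) hb0 (fun x hx => by have := (List.pairwise_cons.1 hp).1 x hx; omega)
          (List.pairwise_cons.1 hp).2]

lemma pvChunks_length {α : Type} (xs : List α) :
    ∀ (bs : List Int) (start : Int), (pvChunks xs bs start).length = bs.length := by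
  intro bs
  induction bs with
  | nil => intro start; rfl
  | cons b bs ih => intro start; simp [pvChunks, ih]

lemma pvChunks_getElem {α : Type} (xs : List α) :
    ∀ (bs : List Int) (start : Int) (k : Nat) (hk : k < bs.length),
    (pvChunks xs bs start)[k]'(by rw [pvChunks_length]; exact hk)
      = (xs.drop (match k, hk with
          | 0, _ => start.toNat
          | (k'+1), hk => (bs[k']'(by omega) + 1).toNat)).take
          ((bs[k]'hk + 1).toNat - (match k, hk with
          | 0, _ => start.toNat
          | (k'+1), hk => (bs[k']'(by omega) + 1).toNat)) := by
  intro bs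
  induction bs with
  | nil => intro _ k hk; simp at hk
  | cons b bs ih =>
    intro start k hk
    rcases k with _ | k'
    · rfl
    · have hk' : k' < bs.length := by simpa using hk
      have := ih (b+1) k' hk'
      simp only [pvChunks, List.getElem_cons_succ, this]
      rcases k' with _ | k''
      · rfl
      · rfl

lemma cnt_eq_countP (f : Int → Bool) (N j : Int) (h0 : 0 ≤ j) (hj : j ≤ N) :
    ((PySem.List.pyRange 0 j 1).filter f).length
      = ((PySem.List.pyRange 0 N 1).filter f).countP (fun b => decide (b < j)) := by
  rw [PySem.List.pyRange_one_append 0 j N h0 hj, List.filter_append, List.countP_append]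
  have h1 : ((PySem.List.pyRange 0 j 1).filter f).countP (fun b => decide (b < j))
      = ((PySem.List.pyRange 0 j 1).filter f).length := by
    apply List.countP_eq_length.2
    intro b hb
    have := (PySem.List.mem_pyRange_one).1 (List.mem_of_mem_filter hb)
    simp only [decide_eq_true_eq]; omega
  have h2 : ((PySem.List.pyRange j N 1).filter f).countP (fun b => decide (b < j)) = 0 := by
    apply List.countP_eq_zero.2
    intro b hb
    have := (PySem.List.mem_pyRange_one).1 (List.mem_of_mem_filter hb)
    simp only [decide_eq_true_eq]; omega
  omega

lemma group_eq_chunks (xs : List String) (f : Int → Bool) (N : Int)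
    (hN : N = (xs.length : Int)) :
    (PySem.List.pyRange 0 (((((PySem.List.pyRange 0 N 1).filter f).length : Nat)) : Int) 1).map
        (fun k => ((xs.zip ((PySem.List.pyRange 0 N 1).map
          (fun j => ((((PySem.List.pyRange 0 j 1).filter f).length : Nat) : Int)))).filter
            (fun p => p.2 == k)).map Prod.fst)
      = pvChunks xs ((PySem.List.pyRange 0 N 1).filter f) 0 := by
  set breaks := (PySem.List.pyRange 0 N 1).filter f with hbr
  set seg := (PySem.List.pyRange 0 N 1).map
    (fun j => ((((PySem.List.pyRange 0 j 1).filter f).length : Nat) : Int)) with hseg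
  have hmem : ∀ b ∈ breaks, 0 ≤ b ∧ b < N := by
    intro b hb
    have := (PySem.List.mem_pyRange_one).1 (List.mem_of_mem_filter hb)
    omega
  have hpair : breaks.Pairwise (· < ·) :=
    List.Pairwise.filter _ (PySem.List.pairwise_lt_pyRange_one 0 N)
  have hseglen : seg.length = xs.length := by
    rw [hseg, List.length_map, PySem.List.length_pyRange_one]; omega
  have hsegget : ∀ (j : Nat) (hj : j < seg.length),
      seg[j]'hj = ((breaks.countP (fun b => decide (b < (j : Int))) : Nat) : Int) := by
    intro j hj
    simp only [hseg, List.getElem_map, PySem.List.getElem_pyRange_one]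
    norm_num
    rw [cnt_eq_countP f N (j : Int) (by omega) (by rw [hseglen] at hj; omega)]
  apply List.ext_getElem
  · rw [List.length_map, PySem.List.length_pyRange_one, pvChunks_length]; omega
  · intro k hk1 hk2
    have hk : k < breaks.length := by
      rw [List.length_map, PySem.List.length_pyRange_one] at hk1; omega
    have hkr : k < (PySem.List.pyRange 0 (((breaks.length : Nat)) : Int) 1).length := by
      rw [PySem.List.length_pyRange_one]; omega
    rw [List.getElem_map, PySem.List.getElem_pyRange_one, pvChunks_getElem xs breaks 0 k hk]
    have hzero : ((0 : Int) + (k : Nat)) = ((k : Nat) : Int) := by omega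
    rw [hzero]
    have hbk := hmem _ (List.getElem_mem hk)
    rcases k with _ | k'
    · -- k = 0 : a = 0, b = (breaks[0]+1).toNat
      apply filter_zip_extract xs seg ((0:Nat):Int) 0 ((breaks[0]'hk + 1).toNat)
        hseglen (by omega) (by omega)
      intro j hj
      rw [hsegget j (by omega)]
      rw [Int.ofNat_inj]  -- cast eq
      rw [countP_sorted_iff breaks hpair 0 hk (j : Int)]
      constructor
      · rintro ⟨-, h⟩; exact ⟨by omega, by omega⟩
      · rintro ⟨-, h⟩; exact ⟨trivial, by omega⟩
    · -- k = k'+1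
      have hk' : k' < breaks.length := by omega
      have hbk' := hmem _ (List.getElem_mem hk')
      have hlt : breaks[k']'hk' < breaks[k'+1]'hk := by
        rw [List.pairwise_iff_getElem] at hpair
        exact hpair k' (k'+1) hk' hk (by omega)
      apply filter_zip_extract xs seg ((k'+1 : Nat) : Int)
        ((breaks[k']'hk' + 1).toNat) ((breaks[k'+1]'hk + 1).toNat)
        hseglen (by omega) (by omega)
      intro j hj
      rw [hsegget j (by omega)]
      rw [Int.ofNat_inj]
      rw [countP_sorted_iff breaks hpair (k'+1) hk (j : Int)]
      constructor
      · rintro ⟨h1, h2⟩; exact ⟨by omega, by omega⟩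
      · rintro ⟨h1, h2⟩; exact ⟨by omega, by omega⟩



lemma bucket_getD (sid : Int) :
    ∀ (l : List ((String × String) × Int)) (d : PySem.Dict Int (List String × List String))
      (c : Int) (hc : c < sid),
    ((l.foldl (fun d p => if p.2 < sid then
        d.modify p.2 ([], []) (fun cur => (cur.1 ++ [p.1.1], cur.2 ++ [p.1.2])) else d) d).getD c ([], []))
      = ((d.getD c ([], [])).1 ++ ((l.filter (fun p => p.2 == c)).map (fun p => p.1.1)),
         (d.getD c ([], [])).2 ++ ((l.filter (fun p => p.2 == c)).map (fun p => p.1.2))) := by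
  intro l
  induction l with
  | nil => intro d c hc; simp
  | cons p l ih =>
    intro d c hc
    simp only [List.foldl_cons, List.filter_cons]
    by_cases hp : p.2 < sid
    · simp only [hp, if_true]
      rw [ih _ c hc]
      by_cases hpc : p.2 = c
      · have hbe : (p.2 == c) = true := by simp [hpc]
        rw [PySem.Dict.getD_modify]
        simp [hpc, hbe]
      · have hbe : (p.2 == c) = false := by simp [hpc]
        have hcp : ¬ c = p.2 := fun h => hpc h.symm
        rw [PySem.Dict.getD_modify]
        simp [hcp, hbe]
    · have hbe : (p.2 == c) = false := by
        simp only [beq_eq_false_iff_ne]; intro h; omega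
      simp only [hp, if_false, hbe, Bool.false_eq_true]
      rw [ih _ c hc]

lemma zip3_fst :
    ∀ (ws es : List String) (sg : List Int) (k : Int), ws.length = es.length →
    (((ws.zip es).zip sg).filter (fun p => p.2 == k)).map (fun p => p.1.1)
      = ((ws.zip sg).filter (fun p => p.2 == k)).map Prod.fst := by
  intro ws
  induction ws with
  | nil => intro es sg k _; simp
  | cons w ws ih =>
    intro es sg k hlen
    rcases es with _ | ⟨e, es⟩
    · simp at hlen
    · rcases sg with _ | ⟨s, sg⟩
      · simp
      · simp only [List.zip_cons_cons, List.filter_cons]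
        cases hs : (s == k) <;> simp [hs, ih es sg k (by simpa using hlen)]

lemma zip3_snd :
    ∀ (ws es : List String) (sg : List Int) (k : Int), ws.length = es.length →
    (((ws.zip es).zip sg).filter (fun p => p.2 == k)).map (fun p => p.1.2)
      = ((es.zip sg).filter (fun p => p.2 == k)).map Prod.fst := by
  intro ws
  induction ws with
  | nil => intro es sg k hlen
           rcases es with _ | ⟨e, es⟩
           · simp
           · simp at hlen
  | cons w ws ih =>
    intro es sg k hlen
    rcases es with _ | ⟨e, es⟩
    · simp at hlen
    · rcases sg with _ | ⟨s, sg⟩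
      · simp
      · simp only [List.zip_cons_cons, List.filter_cons]
        cases hs : (s == k) <;> simp [hs, ih es sg k (by simpa using hlen)]

-- ===== VERDICT (by name: the statement is the Claim_ definition above) =====
theorem construct_sent_label_spec : Claim_equal_construct_sent_label := by
  intro words ents _ hpre
  obtain ⟨hlen, hne⟩ := hpre
  unfold Spec_construct_sent_label
  have hn : 0 < words.length := List.length_pos_of_ne_nil hne
  -- A side: loop = emit at A's break indices = chunks at those indices
  simp only [construct_sent_label]
  rw [pvALoop_emit words ents (words.length : Int) ((words.length : Int) - 1).toNat 1 0 [] []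
    (by omega)]
  simp only [List.nil_append]
  rw [pvEmit_eq_chunks words ents
    ((PySem.List.pyRange 1 (words.length : Int) 1).filter (pvIsBreak words ents (words.length : Int)))
    0 (by omega)
    (fun b hb => by
      have := (PySem.List.mem_pyRange_one).1 (List.mem_of_mem_filter hb); omega)
    (List.Pairwise.filter _ (PySem.List.pairwise_lt_pyRange_one 1 (words.length : Int)))]
  -- B side: label-then-group = chunks at B's break indices
  simp only [construct_sent_label_alt]
  rw [foldl_seg (pvFlagB words (ents.map pvTail) (words.length : Int)) words.length]
  have hbuck : ∀ (k : Int),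
      k < ((((PySem.List.pyRange 0 (words.length : Int) 1).filter
              (pvFlagB words (ents.map pvTail) (words.length : Int))).length : Nat) : Int) →
      ((((words.zip ents).zip ((PySem.List.pyRange 0 (words.length : Int) 1).map
            (fun j => ((((PySem.List.pyRange 0 j 1).filter
              (pvFlagB words (ents.map pvTail) (words.length : Int))).length : Nat) : Int)))).foldl
          (fun (d : PySem.Dict Int (List String × List String)) p =>
            if p.2 < ((((PySem.List.pyRange 0 (words.length : Int) 1).filter
                  (pvFlagB words (ents.map pvTail) (words.length : Int))).length : Nat) : Int) then
              d.modify p.2 ([], []) (fun cur => (cur.1 ++ [p.1.1], cur.2 ++ [p.1.2]))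
            else d)
          PySem.Dict.empty).getD k ([], []))
        = ((((words.zip ((PySem.List.pyRange 0 (words.length : Int) 1).map
              (fun j => ((((PySem.List.pyRange 0 j 1).filter
                (pvFlagB words (ents.map pvTail) (words.length : Int))).length : Nat) : Int)))).filter
                  (fun p => p.2 == k)).map Prod.fst),
           (((ents.zip ((PySem.List.pyRange 0 (words.length : Int) 1).map
              (fun j => ((((PySem.List.pyRange 0 j 1).filter
                (pvFlagB words (ents.map pvTail) (words.length : Int))).length : Nat) : Int)))).filter
                  (fun p => p.2 == k)).map Prod.fst)) := by
    intro k hk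
    rw [bucket_getD _ _ PySem.Dict.empty k hk, PySem.Dict.getD_empty,
      zip3_fst words ents _ k hlen, zip3_snd words ents _ k hlen]
    simp
  have hm1 := List.map_congr_left (l := PySem.List.pyRange 0
      ((((PySem.List.pyRange 0 (words.length : Int) 1).filter
          (pvFlagB words (ents.map pvTail) (words.length : Int))).length : Nat) : Int) 1)
    (fun k hk => congrArg (fun t => PySem.Str.join " " (Prod.fst t))
      (hbuck k ((PySem.List.mem_pyRange_one).1 hk).2))
  have hm2 := List.map_congr_left (l := PySem.List.pyRange 0
      ((((PySem.List.pyRange 0 (words.length : Int) 1).filter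
          (pvFlagB words (ents.map pvTail) (words.length : Int))).length : Nat) : Int) 1)
    (fun k hk => congrArg Prod.snd (hbuck k ((PySem.List.mem_pyRange_one).1 hk).2))
  simp only [hm1, hm2]
  have hW := group_eq_chunks words (pvFlagB words (ents.map pvTail) (words.length : Int))
    (words.length : Int) rfl
  have hE := group_eq_chunks ents (pvFlagB words (ents.map pvTail) (words.length : Int))
    (words.length : Int) (by rw [hlen])
  have hW' := congrArg (List.map (PySem.Str.join " ")) hW
  rw [List.map_map] at hW'
  simp only [Function.comp_def] at hW'
  simp only [hW', hE]
  rw [breaks_eq words ents (words.length : Int) (by omega)]
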